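-- pv_equiv track=rewrite | github.com/alastairreid/mra_tools | bin/asm.py | expand_dontcares
-- ===== SOURCE A (Python) =====
-- def expand_dontcares(s):
--     if len(s) == 0:
--         return []
--     elif len(s) == 1:
--         if s in 'xX':
--             return ['0', '1']
--         elif s in '10':
--             return s
--         else:
--             assert False, 'expand_dontcares() saw non-1|0|x'
--     elif s[0] in 'xX':
--         rest = expand_dontcares(s[1:])
--         return (['0' + r for r in rest] +
--                 ['1' + r for r in rest])
--     elif s[0] in '10':
--         return [s[0] + r for r in expand_dontcares(s[1:])]
--     else:
--         assert False, 'expand_dontcares() saw non-1|0|x'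
-- ===== SOURCE B (Python) =====
-- def expand_dontcares(s):
--     if len(s) == 0:
--         return []
--     acc = ['']
--     for c in s:
--         if c in 'xX':
--             opts = ['0', '1']
--         else:
--             assert c in '10', 'expand_dontcares() saw non-1|0|x'
--             opts = [c]
--         acc = [p + o for p in acc for o in opts]
--     return acc
-- ===== Notes on version B (the rewrite author's own statement) =====
-- stated objective: idiomatic
-- what changed: Replaces the prefix recursion (which rebuilds suffix result lists and concatenates two mapped copies per wildcard) with a single left-to-right pass that extends an accumulator of partial strings by each character's choices.
-- outside the precondition, e.g. on expand_dontcares('0'): A returns '0', B returns ['0']; on expand_dontcares('1'): A returns '1', B returns ['1']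
import Mathlib
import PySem

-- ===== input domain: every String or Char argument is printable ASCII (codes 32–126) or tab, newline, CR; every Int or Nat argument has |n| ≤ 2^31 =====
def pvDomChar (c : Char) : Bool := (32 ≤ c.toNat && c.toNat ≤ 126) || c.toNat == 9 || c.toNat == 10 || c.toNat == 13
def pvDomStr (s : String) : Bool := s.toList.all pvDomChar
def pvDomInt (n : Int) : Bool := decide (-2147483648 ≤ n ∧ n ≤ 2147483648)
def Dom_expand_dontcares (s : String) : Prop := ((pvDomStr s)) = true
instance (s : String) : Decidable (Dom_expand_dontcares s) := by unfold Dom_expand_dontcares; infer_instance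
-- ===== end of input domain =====

-- B replaces A's prefix recursion by one left-to-right accumulator pass; same results on Pre_.

-- ===== PORT A =====
-- A's recursion on the character list; A returns the bare string s (not a list) when
-- len(s)==1 and the char is fixed, and asserts on chars outside 01xX — both outside Pre_,
-- where this port's values ([[c]] resp. []) are arbitrary placeholders.
def pvExpandA : List Char → List (List Char)
  | [] => []
  | [c] =>
      if c = 'x' ∨ c = 'X' then [['0'], ['1']]
      else if c = '1' ∨ c = '0' then [[c]]
      else []
  | c :: d :: rest =>
      let e := pvExpandA (d :: rest)
      if c = 'x' ∨ c = 'X' then e.map (fun r => '0' :: r) ++ e.map (fun r => '1' :: r)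
      else if c = '1' ∨ c = '0' then e.map (fun r => c :: r)
      else []

def expand_dontcares (s : String) : List String := (pvExpandA s.toList).map String.mk

-- ===== PORT B =====
-- one step of B's loop: extend every partial string by each choice for c
def pvStepB (acc : List (List Char)) (c : Char) : List (List Char) :=
  let opts : List Char := if c = 'x' ∨ c = 'X' then ['0', '1'] else [c]
  acc.flatMap (fun p => opts.map (fun o => p ++ [o]))

def expand_dontcares_alt (s : String) : List String :=
  if s.toList = [] then []
  else ((s.toList.foldl pvStepB [[]]).map String.mk)

-- ===== PRECONDITION & SPEC =====
-- Pre_ excludes (a) strings with a character outside 0/1/x/X, on which A raises AssertionError,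
-- and (b) the two one-character strings "0" and "1", on which A returns the bare string
-- (not a list of strings, so not a value of the declared return type); B returns ["0"]/["1"] there.
def Pre_expand_dontcares (s : String) : Prop :=
  s.toList.all (fun c => c == '0' || c == '1' || c == 'x' || c == 'X') = true ∧ s ≠ "0" ∧ s ≠ "1"
instance (s : String) : Decidable (Pre_expand_dontcares s) := by unfold Pre_expand_dontcares; infer_instance

def pvWitness_expand_dontcares : String := "1x0X"

def Spec_expand_dontcares (s : String) (out : List String) : Prop := out = expand_dontcares_alt s
instance (s : String) (out : List String) : Decidable (Spec_expand_dontcares s out) := by unfold Spec_expand_dontcares; infer_instance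

-- ===== CLAIM (what is proved, stated in full; the proofs are below) =====
def Claim_equal_expand_dontcares : Prop := ∀ (s : String), Dom_expand_dontcares s → Pre_expand_dontcares s → Spec_expand_dontcares s (expand_dontcares s)

-- ===== LEMMAS AND PROOFS =====

-- E l: the set of completions of the suffix l ([[]] for the empty suffix)
def pvE (l : List Char) : List (List Char) := if l = [] then [[]] else pvExpandA l

lemma pvE_cons (c : Char) (l : List Char)
    (hc : c = '0' ∨ c = '1' ∨ c = 'x' ∨ c = 'X') :
    pvE (c :: l) =
      (if c = 'x' ∨ c = 'X' then ['0', '1'] else [c]).flatMap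
        (fun o => (pvE l).map (fun r => o :: r)) := by
  cases l with
  | nil =>
      simp only [pvE, pvExpandA, if_neg (by simp : (c :: []) ≠ [])]
      rcases hc with h | h | h | h <;> subst h <;> simp
  | cons d rest =>
      simp only [pvE, pvExpandA, if_neg (by simp : (c :: d :: rest) ≠ []),
        if_neg (by simp : (d :: rest) ≠ [])]
      rcases hc with h | h | h | h <;> subst h <;> simp

lemma pvFoldl_stepB (l : List Char)
    (h : ∀ c ∈ l, c = '0' ∨ c = '1' ∨ c = 'x' ∨ c = 'X') (acc : List (List Char)) :
    l.foldl pvStepB acc = acc.flatMap (fun p => (pvE l).map (fun r => p ++ r)) := by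
  induction l generalizing acc with
  | nil => simp [pvE]
  | cons c l ih =>
      have hc := h c (by simp)
      have hl : ∀ c ∈ l, c = '0' ∨ c = '1' ∨ c = 'x' ∨ c = 'X' :=
        fun d hd => h d (by simp [hd])
      rw [List.foldl_cons, ih hl, pvE_cons c l hc, pvStepB]
      rcases hc with h' | h' | h' | h' <;> subst h' <;>
        simp [List.flatMap_assoc, Function.comp_def]

-- ===== VERDICT (by name: the statement is the Claim_ definition above) =====

theorem expand_dontcares_spec : Claim_equal_expand_dontcares := by
  intro s _ hpre
  unfold Spec_expand_dontcares expand_dontcares expand_dontcares_alt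
  rcases hpre with ⟨hall, _, _⟩
  have hchars : ∀ c ∈ s.toList, c = '0' ∨ c = '1' ∨ c = 'x' ∨ c = 'X' := by
    have h' := List.all_eq_true.mp hall
    intro c hc
    have := h' c hc; simp at this; tauto
  cases hl : s.toList with
  | nil => simp [pvExpandA]
  | cons c rest =>
      rw [if_neg (by simp)]
      have hgood : ∀ d ∈ (c :: rest), d = '0' ∨ d = '1' ∨ d = 'x' ∨ d = 'X' := by
        intro d hd; exact hchars d (hl ▸ hd)
      rw [pvFoldl_stepB _ hgood]
      have : pvE (c :: rest) = pvExpandA (c :: rest) := by simp [pvE]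
      simp [this]
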